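-- pv_equiv track=rewrite | github.com/shelly1804/Bioinformatik-shelly | Assignment_extra1/Extra1_sample- Shelly.py | distanceBetweenPatternAndString
-- ===== SOURCE A (Python) =====
-- def hammingDistance(p, q): #Funktion, die Hamming Distance, also die Unterschiede zwischen 2 Strings, berechnet
--     ham = 0
--     for index, y in zip(p, q):
--         if index != y:
--             ham +=1
--     return ham
--
-- def distanceBetweenPatternAndString(pattern, DNA): #Funktion, die Unterschied zwischen dem untersuchten Pattern (Basensequenz) und dem DNA Strang berechnet
--     k = len(pattern)
--     distance = 0
--     for index in DNA:
--         hamming = k+1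
--         for i in range(len(index) - k + 1):
--             z = hammingDistance(pattern, index[i:i+k])
--             if hamming > z:
--                 hamming = z
--         distance += hamming
--     return distance
-- ===== SOURCE B (Python) =====
-- def distanceBetweenPatternAndString(pattern, DNA):
--     k = len(pattern)
--     total = 0
--     for s in DNA:
--         n = len(s) - k + 1
--         if n <= 0:          # string shorter than the pattern: no window at all
--             total += k + 1
--             continue
--         counts = [0] * n
--         for j, c in enumerate(pattern):
--             counts = [cnt + (s[i + j] != c) for i, cnt in enumerate(counts)]
--         total += min(counts)
--     return total
-- ===== Notes on version B (the rewrite author's own statement) =====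
-- stated objective: alternative
-- what changed: A rescans a fresh k-char hammingDistance over a fresh slice for every window of every string; B keeps one mismatch-count array over all windows of a string, updates it once per pattern position (transposed traversal, no per-window slicing), and takes a single min.
import Mathlib
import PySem

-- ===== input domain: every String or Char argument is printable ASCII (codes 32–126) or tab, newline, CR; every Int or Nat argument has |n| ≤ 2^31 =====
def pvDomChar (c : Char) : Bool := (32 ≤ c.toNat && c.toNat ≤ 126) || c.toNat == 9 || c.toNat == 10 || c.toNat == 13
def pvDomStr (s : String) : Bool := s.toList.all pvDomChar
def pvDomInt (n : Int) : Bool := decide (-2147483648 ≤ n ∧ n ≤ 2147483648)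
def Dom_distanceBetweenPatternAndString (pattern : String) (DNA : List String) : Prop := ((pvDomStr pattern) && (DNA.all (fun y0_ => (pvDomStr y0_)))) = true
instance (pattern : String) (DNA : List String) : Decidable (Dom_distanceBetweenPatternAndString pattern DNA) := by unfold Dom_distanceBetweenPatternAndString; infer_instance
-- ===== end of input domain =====

-- B replaces A's per-window hammingDistance rescans by a per-string mismatch-count array
-- updated once per pattern position (a transposed traversal, no per-window slicing), then takes one min.

-- ===== PORT A =====
def hammingDistance (p q : String) : Int :=
  (p.toList.zip q.toList).foldl (fun ham iy => if iy.1 ≠ iy.2 then ham + 1 else ham) 0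

def distanceBetweenPatternAndString (pattern : String) (DNA : List String) : Int :=
  let k : Int := PySem.Str.len pattern
  DNA.foldl (fun distance index =>
    let hamming :=
      (PySem.List.pyRange 0 (PySem.Str.len index - k + 1) 1).foldl
        (fun hamming i =>
          let z := hammingDistance pattern (PySem.Str.slice index (some i) (some (i + k)))
          if hamming > z then z else hamming)
        (k + 1)
    distance + hamming) 0

-- ===== PORT B =====
-- s[i + j] is always in range where counts is nonempty (i < len(s)-k+1, j < k), so pyGetD's default is never read.
def distanceBetweenPatternAndString_alt (pattern : String) (DNA : List String) : Int :=
  let k : Int := PySem.Str.len pattern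
  DNA.foldl (fun total s =>
    let n : Int := PySem.Str.len s - k + 1
    if n ≤ 0 then total + (k + 1)
    else
      let counts : List Int := List.replicate n.toNat 0
      let counts :=
        (PySem.List.enumerate pattern.toList 0).foldl
          (fun counts jc =>
            (PySem.List.enumerate counts 0).map
              (fun ic => ic.2 + (if PySem.List.pyGetD s.toList (ic.1 + jc.1) ' ' ≠ jc.2 then 1 else 0)))
          counts
      -- counts is nonempty here (n ≥ 1), so Python's min(counts) returns; the .getD default is never read
      total + (PySem.List.min? counts id).getD 0) 0

-- ===== PRECONDITION & SPEC =====
def Spec_distanceBetweenPatternAndString (pattern : String) (DNA : List String) (out : Int) : Prop := out = distanceBetweenPatternAndString_alt pattern DNA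
instance (pattern : String) (DNA : List String) (out : Int) : Decidable (Spec_distanceBetweenPatternAndString pattern DNA out) := by unfold Spec_distanceBetweenPatternAndString; infer_instance

-- ===== CLAIM (what is proved, stated in full; the proofs are below) =====
def Claim_equal_distanceBetweenPatternAndString : Prop := ∀ (pattern : String) (DNA : List String), Dom_distanceBetweenPatternAndString pattern DNA → Spec_distanceBetweenPatternAndString pattern DNA (distanceBetweenPatternAndString pattern DNA)

-- ===== LEMMAS AND PROOFS =====

/-- mismatch count between `p` and the corresponding prefix of `t` (zip truncates). -/
def mism (p t : List Char) : Int := ((p.zip t).countP (fun q => q.1 ≠ q.2) : Int)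

theorem zip_take (p t : List Char) : p.zip (t.take p.length) = p.zip t := by
  induction p generalizing t with
  | nil => simp
  | cons c p ih => cases t <;> simp [ih]

theorem mism_le (p t : List Char) : mism p t ≤ (p.length : Int) := by
  unfold mism
  have h1 := List.countP_le_length (l := p.zip t) (p := fun q => decide (q.1 ≠ q.2))
  have h2 : (p.zip t).length ≤ p.length := by simp
  omega

theorem hammingDistance_eq (p q : String) : hammingDistance p q = mism p.toList q.toList := by
  unfold hammingDistance mism
  rw [PySem.List.foldl_ite_add_one (p := fun iy : Char × Char => iy.1 ≠ iy.2)]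
  simp

theorem mism_nil (t : List Char) : mism [] t = 0 := by simp [mism]

theorem mism_cons (c : Char) (p : List Char) (a : Char) (t : List Char) :
    mism (c :: p) (a :: t) = (if a ≠ c then 1 else 0) + mism p t := by
  simp only [mism, List.zip_cons_cons, List.countP_cons]
  by_cases h : a = c
  · subst h; simp
  · have h' : c ≠ a := Ne.symm h
    simp only [ne_eq, decide_not]
    simp [h', h]
    ring

-- the B inner loop, abstracted over the scanned string s
def bStep (s : List Char) (counts : List Int) (jc : Int × Char) : List Int :=
  (PySem.List.enumerate counts 0).map
    (fun ic => ic.2 + (if PySem.List.pyGetD s (ic.1 + jc.1) ' ' ≠ jc.2 then 1 else 0))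

theorem bStep_nil (s : List Char) (q : List Char) (j : Int) :
    (PySem.List.enumerate q j).foldl (bStep s) [] = [] := by
  induction q generalizing j with
  | nil => rfl
  | cons c q ih => simp [PySem.List.enumerate_cons, bStep, PySem.List.enumerate_nil, ih]

theorem counts_inv (s q : List Char) (j : Nat) (cs : List Int)
    (h : cs.length + j + q.length ≤ s.length + 1) :
    (PySem.List.enumerate q (j : Int)).foldl (bStep s) cs
      = (List.range cs.length).map
          (fun i => cs.getD i 0 + mism q (s.drop (i + j))) := by
  induction q generalizing j cs with
  | nil =>
      simp only [PySem.List.enumerate_nil, List.foldl_nil, mism_nil, add_zero]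
      apply List.ext_getElem (by simp)
      intro i hi hi'
      simp [List.getD_eq_getElem?_getD, List.getElem?_eq_getElem hi]
  | cons c q ih =>
      rcases Nat.eq_zero_or_pos cs.length with hz | hpos
      · rw [List.length_eq_zero_iff.mp hz, bStep_nil]; simp
      · have hcons : ((j : Int) : Int) = ((j : Nat) : Int) := rfl
        rw [PySem.List.enumerate_cons, List.foldl_cons]
        have hstep : bStep s cs ((j : Int), c)
            = (List.range cs.length).map
                (fun i => cs.getD i 0 + (if s.getD (i + j) ' ' ≠ c then 1 else 0)) := by
          apply List.ext_getElem (by simp [bStep])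
          intro i hi hi'
          simp only [bStep, List.length_map, PySem.List.length_enumerate] at hi
          simp only [bStep, List.getElem_map, PySem.List.getElem_enumerate]
          have : ((0 : Int) + i + j) = ((i + j : Nat) : Int) := by push_cast; ring
          rw [this, PySem.List.pyGetD_natCast]
          simp [List.getD_eq_getElem?_getD, List.getElem?_eq_getElem hi]
      
        have hlen : (bStep s cs ((j : Int), c)).length = cs.length := by
          simp [bStep]
        have hj1 : ((j : Int) + 1) = (((j + 1 : Nat)) : Int) := by push_cast; ring
        rw [hj1, ih (j + 1) _ (by rw [hlen]; simp only [List.length_cons] at h; omega)]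
        rw [hlen, hstep]
        apply List.ext_getElem (by simp)
        intro i hi hi'
        simp only [List.getElem_map, List.getElem_range]
        have hi'' : i < cs.length := by simpa using hi
        have hrange : i + j < s.length := by
          have h' := h
          simp only [List.length_cons] at h'
          omega
        have hdrop : s.drop (i + j) = s[i + j] :: s.drop (i + j + 1) := by
          rw [List.drop_eq_getElem_cons hrange]
        rw [List.getD_eq_getElem?_getD, List.getElem?_map, List.getElem?_range hi'',
            hdrop, mism_cons]
        have : i + (j + 1) = i + j + 1 := by omega
        simp [this, List.getD_eq_getElem?_getD, List.getElem?_eq_getElem hi'', List.getElem?_eq_getElem hrange]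
        ring

-- Python's min with key=id, on a cons, is the plain fold of A's min-update step
theorem min?_cons_cons (a x : Int) (xs : List Int) :
    PySem.List.min? (a :: x :: xs) id = PySem.List.min? ((if x < a then x else a) :: xs) id := by
  by_cases h : x < a <;> simp [PySem.List.min?, h]

theorem min?_cons (xs : List Int) : ∀ a : Int,
    PySem.List.min? (a :: xs) id = some (xs.foldl (fun h z => if h > z then z else h) a) := by
  induction xs with
  | nil => intro a; rfl
  | cons x xs ih =>
      intro a
      rw [min?_cons_cons, ih]
      simp only [List.foldl_cons, gt_iff_lt]

theorem foldl_min_seed (a : Int) (xs : List Int) (k : Int) (ha : a ≤ k) :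
    (a :: xs).foldl (fun h z => if h > z then z else h) (k + 1)
      = (PySem.List.min? (a :: xs) id).getD 0 := by
  rw [min?_cons, Option.getD_some, List.foldl_cons]
  have : (if (k + 1) > a then a else (k + 1)) = a := by split <;> omega
  rw [this]

-- per-string equality, List Char level
theorem perString_eq_chars (p : List Char) (s : String) :
    (PySem.List.pyRange 0 (PySem.Str.len s - (p.length : Int) + 1) 1).foldl
        (fun hamming i =>
          let z := mism p (PySem.List.slice s.toList (some i) (some (i + (p.length : Int))))
          if hamming > z then z else hamming)
        ((p.length : Int) + 1)
      = (if PySem.Str.len s - (p.length : Int) + 1 ≤ 0 then (p.length : Int) + 1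
         else
          (PySem.List.min?
            ((PySem.List.enumerate p 0).foldl (bStep s.toList)
              (List.replicate (PySem.Str.len s - (p.length : Int) + 1).toNat 0)) id).getD 0) := by
  have hlen : PySem.Str.len s = (s.toList.length : Int) := by simp [PySem.Str.len_eq]
  set t := s.toList with ht
  by_cases hn : (t.length : Int) - (p.length : Int) + 1 ≤ 0
  · -- no windows: range empty, B takes the short branch
    rw [hlen, PySem.List.pyRange_one_eq_nil (by omega), if_pos (by omega)]
    rfl
  · push Not at hn
    rw [hlen, if_neg (by omega)]
    set N : Nat := ((t.length : Int) - (p.length : Int) + 1).toNat with hN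
    have hNpos : 0 < N := by omega
    have hNs : N + p.length = t.length + 1 := by omega
    -- counts side
    have h0 : (PySem.List.enumerate p 0) = PySem.List.enumerate p ((0 : Nat) : Int) := rfl
    have hc := counts_inv t p 0 (List.replicate N 0) (by simp; omega)
    rw [h0, hc]
    -- A side: fold over pyRange as fold over range
    have hrange : PySem.List.pyRange 0 ((t.length : Int) - (p.length : Int) + 1) 1
        = (List.range N).map (fun i => ((i : Nat) : Int)) := by
      rw [PySem.List.pyRange_one]
      simp [hN]
    rw [hrange, List.foldl_map]
    -- identify the window value
    have hwin : ∀ i : Nat, i < N →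
        mism p (PySem.List.slice t (some ((i : Nat) : Int)) (some (((i : Nat) : Int) + (p.length : Int))))
          = mism p (t.drop i) := by
      intro i hi
      have : (((i : Nat)) : Int) + ((p.length : Nat) : Int) = (((i + p.length : Nat)) : Int) := by push_cast; ring
      rw [this, PySem.List.slice_natCast]
      have htake : (i + p.length) - i = p.length := by omega
      rw [htake]
      unfold mism
      rw [← zip_take p (t.drop i)]
    have hcongr :
        (List.range N).foldl
          (fun hamming i =>
            let z := mism p (PySem.List.slice t (some ((i : Nat) : Int)) (some (((i : Nat) : Int) + (p.length : Int))))
            if hamming > z then z else hamming)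
          ((p.length : Int) + 1)
        = (List.range N).foldl
          (fun hamming i =>
            let z := mism p (t.drop i)
            if hamming > z then z else hamming)
          ((p.length : Int) + 1) := by
      apply PySem.List.foldl_congr_mem
      intro acc x hx
      simp only []
      rw [hwin x (by simpa using hx)]
    rw [hcongr]
    have hmap : (List.range N).foldl
          (fun hamming i =>
            let z := mism p (t.drop i)
            if hamming > z then z else hamming)
          ((p.length : Int) + 1)
        = ((List.range N).map (fun i => mism p (t.drop i))).foldl
            (fun h z => if h > z then z else h) ((p.length : Int) + 1) := by
      rw [List.foldl_map]
    rw [hmap]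
    -- the common window list, nonempty with entries ≤ k
    have hm : (List.replicate N (0:Int)).length = N := by simp
    rcases hL : (List.range (List.replicate N (0:Int)).length).map
        (fun i => (List.replicate N (0:Int)).getD i 0 + mism p (t.drop (i + 0))) with _ | ⟨a, xs⟩
    · exfalso
      have := congrArg List.length hL
      simp [hm] at this
      omega
    · have ha : a ≤ (p.length : Int) := by
        have : a ∈ (List.range (List.replicate N (0:Int)).length).map
            (fun i => (List.replicate N (0:Int)).getD i 0 + mism p (t.drop (i + 0))) := by
          rw [hL]; exact List.mem_cons_self
        obtain ⟨i, _, rfl⟩ := List.mem_map.mp this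
        have := mism_le p (t.drop (i + 0))
        simp [List.getD_eq_getElem?_getD]
        omega
      have hsame : (List.range N).map (fun i => mism p (t.drop i))
          = (List.range (List.replicate N (0:Int)).length).map
              (fun i => (List.replicate N (0:Int)).getD i 0 + mism p (t.drop (i + 0))) := by
        rw [hm]
        apply List.map_congr_left
        intro i hi
        simp [List.getD_eq_getElem?_getD, List.mem_range.mp hi]
      rw [hsame, hL, foldl_min_seed a xs _ ha]

theorem perString_eq (pattern s : String) :
    (PySem.List.pyRange 0 (PySem.Str.len s - PySem.Str.len pattern + 1) 1).foldl
        (fun hamming i =>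
          let z := hammingDistance pattern (PySem.Str.slice s (some i) (some (i + PySem.Str.len pattern)))
          if hamming > z then z else hamming)
        (PySem.Str.len pattern + 1)
      = (if PySem.Str.len s - PySem.Str.len pattern + 1 ≤ 0 then PySem.Str.len pattern + 1
         else
          (PySem.List.min?
            ((PySem.List.enumerate pattern.toList 0).foldl (bStep s.toList)
              (List.replicate (PySem.Str.len s - PySem.Str.len pattern + 1).toNat 0)) id).getD 0) := by
  have hk : PySem.Str.len pattern = ((pattern.toList.length : Nat) : Int) := by simp
  rw [hk]
  rw [← perString_eq_chars pattern.toList s]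
  apply PySem.List.foldl_congr_mem
  intro acc i _
  simp only [hammingDistance_eq]
  simp [pysem]

-- ===== VERDICT (by name: the statement is the Claim_ definition above) =====
theorem distanceBetweenPatternAndString_spec : Claim_equal_distanceBetweenPatternAndString := by
  intro pattern DNA _
  unfold Spec_distanceBetweenPatternAndString distanceBetweenPatternAndString distanceBetweenPatternAndString_alt
  simp only []
  apply PySem.List.foldl_congr_mem
  intro acc s _
  have h := perString_eq pattern s
  by_cases hc : PySem.Str.len s - PySem.Str.len pattern + 1 ≤ 0
  · rw [if_pos hc] at h
    rw [if_pos hc]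
    exact congrArg (acc + ·) h
  · rw [if_neg hc] at h
    rw [if_neg hc]
    exact congrArg (acc + ·) h
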